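-- pv_equiv track=rewrite | github.com/gzengm/riichi-mahjong | 听牌形及向听形统计/一色听牌形及向听形/舍牌听牌形及向听形/ptn.py | allptn
-- ===== SOURCE A (Python) =====
-- import itertools
--
-- def combi(a, r):
-- 	ret = []
-- 	t = list(itertools.combinations(a, r))
-- 	for i in t:
-- 		ret.append(list(i))
-- 	return ret
--
-- def allptn(a, n):
-- 	ret = []
-- 	for i in range(n // 4 + 1):
-- 		for j in range((n - 4 * i) // 3 + 1):
-- 			for k in range((n - 4 * i - 3 * j) // 2 + 1):
-- 				t = a
-- 				for kung in combi(t, i):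
-- 					for e in kung:
-- 						t.remove(e)
-- 					for pong in combi(t, j):
-- 						for e in pong:
-- 							t.remove(e)
-- 						for toitsu in combi(t, k):
-- 							for e in toitsu:
-- 								t.remove(e)
-- 							for single in combi(t, n - 4 * i - 3 * j - 2 * k):
-- 								hai = []
-- 								for e in kung:
-- 									hai.extend([e] * 4)
-- 								for e in pong:
-- 									hai.extend([e] * 3)
-- 								for e in toitsu:
-- 									hai.extend([e] * 2)
-- 								for e in single:
-- 									hai.extend([e])
-- 								hai.sort()
-- 								ret.append(hai)
-- 							for e in toitsu:
-- 								t.append(e)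
-- 						for e in pong:
-- 							t.append(e)
-- 					for e in kung:
-- 						t.append(e)
-- 	ret.sort()
-- 	return ret
-- ===== SOURCE B (Python) =====
-- def allptn(a, n):
--     # Recursion over positions: assign each tile a multiplicity 0..4 (4=quad, 3=triplet,
--     # 2=pair, 1=single), summing to n; sort each hand and the final list.
--     def go(xs, rem):
--         if not xs:
--             return [[]] if rem == 0 else []
--         out = []
--         for m in range(5):
--             if m <= rem:
--                 for h in go(xs[1:], rem - m):
--                     out.append([xs[0]] * m + h)
--         return out
--     ret = [sorted(h) for h in go(a, n)]
--     ret.sort()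
--     return ret
-- ===== Notes on version B (the rewrite author's own statement) =====
-- stated objective: alternative
-- what changed: A enumerates hands by a triple loop over (quad,triplet,pair) counts with itertools.combinations and in-place remove/append backtracking on the aliased input list; B is a single recursion over tile positions that assigns each tile a multiplicity 0-4 summing to n, builds each hand directly, and never mutates the input.
import Mathlib
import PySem

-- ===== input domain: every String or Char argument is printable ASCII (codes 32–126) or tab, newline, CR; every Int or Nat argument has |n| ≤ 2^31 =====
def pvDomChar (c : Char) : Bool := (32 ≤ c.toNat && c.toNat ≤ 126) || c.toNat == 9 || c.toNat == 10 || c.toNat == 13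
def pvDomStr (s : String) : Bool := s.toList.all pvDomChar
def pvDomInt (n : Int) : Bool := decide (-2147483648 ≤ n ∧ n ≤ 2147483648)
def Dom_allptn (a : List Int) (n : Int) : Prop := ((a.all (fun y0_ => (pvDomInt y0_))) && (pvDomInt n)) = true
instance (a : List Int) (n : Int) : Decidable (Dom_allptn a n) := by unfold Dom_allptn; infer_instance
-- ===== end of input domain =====

-- B re-implements A by a recursion over tile positions assigning each a multiplicity 0..4
-- (alternative algorithm, same return value); equivalence is about the RETURN value only:
-- Python A reorders the caller's list `a` in place (remove/append aliasing), B does not mutate.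

-- ===== PORT A =====
-- itertools.combinations(xs, r) (r ≥ 0 at every call site), in Python's order
def combiNat : List Int → Nat → List (List Int)
  | _, 0 => [[]]
  | [], _ + 1 => []
  | x :: t, r + 1 => ((combiNat t r).map (fun c => x :: c)) ++ combiNat t (r + 1)

def combi (xs : List Int) (r : Int) : List (List Int) := combiNat xs r.toNat

-- t.remove(e); e is a member of t at every call site, so the getD default is never used
def pyRemove (t : List Int) (e : Int) : List Int := (PySem.List.remove? t e).getD t

-- 'for e in es: t.remove(e)'
def removeAll (t : List Int) (es : List Int) : List Int := es.foldl pyRemove t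

-- hai = []; the four extend loops; hai.sort()
def buildHai (kung pong toitsu single : List Int) : List Int :=
  PySem.List.sorted
    (single.foldl (fun h e => h ++ [e])
      (toitsu.foldl (fun h e => h ++ [e, e])
        (pong.foldl (fun h e => h ++ [e, e, e])
          (kung.foldl (fun h e => h ++ [e, e, e, e]) []))))
    (fun x => x) false

-- 'for single in combi(t, n-4i-3j-2k): ... ret.append(hai)'
def singleLoop (ret : List (List Int)) (kung pong toitsu t : List Int) (r : Int) : List (List Int) :=
  (combi t r).foldl (fun ret single => ret ++ [buildHai kung pong toitsu single]) ret

-- state everywhere: (ret, t) with t the in-place mutated list aliased to a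
def toitsuLoop (st : List (List Int) × List Int) (kung pong : List Int) (k r : Int) :
    List (List Int) × List Int :=
  (combi st.2 k).foldl (fun st toitsu =>
    let t := removeAll st.2 toitsu
    (singleLoop st.1 kung pong toitsu t r, t ++ toitsu)) st

def pongLoop (st : List (List Int) × List Int) (kung : List Int) (j k r : Int) :
    List (List Int) × List Int :=
  (combi st.2 j).foldl (fun st pong =>
    let t := removeAll st.2 pong
    let st' := toitsuLoop (st.1, t) kung pong k r
    (st'.1, st'.2 ++ pong)) st

def kungLoop (st : List (List Int) × List Int) (i j k r : Int) :
    List (List Int) × List Int :=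
  (combi st.2 i).foldl (fun st kung =>
    let t := removeAll st.2 kung
    let st' := pongLoop (st.1, t) kung j k r
    (st'.1, st'.2 ++ kung)) st

def allptn (a : List Int) (n : Int) : List (List Int) :=
  PySem.List.sorted
    (((PySem.List.pyRange 0 (PySem.Int.floordiv n 4 + 1) 1).foldl (fun st i =>
      (PySem.List.pyRange 0 (PySem.Int.floordiv (n - 4 * i) 3 + 1) 1).foldl (fun st j =>
        (PySem.List.pyRange 0 (PySem.Int.floordiv (n - 4 * i - 3 * j) 2 + 1) 1).foldl (fun st k =>
          kungLoop st i j k (n - 4 * i - 3 * j - 2 * k)) st) st)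
      (([] : List (List Int)), a)).1)
    (fun x => x) false

-- ===== PORT B =====
def goB : List Int → Int → List (List Int)
  | [], rem => if rem = 0 then [[]] else []
  | x :: rest, rem =>
    (PySem.List.pyRange 0 5 1).foldl
      (fun out m =>
        if m ≤ rem then out ++ (goB rest (rem - m)).map (fun h => List.replicate m.toNat x ++ h)
        else out)
      []

def allptn_alt (a : List Int) (n : Int) : List (List Int) :=
  PySem.List.sorted ((goB a n).map (fun h => PySem.List.sorted h (fun x => x) false))
    (fun x => x) false

-- ===== PRECONDITION & SPEC =====
def Spec_allptn (a : List Int) (n : Int) (out : List (List Int)) : Prop := out = allptn_alt a n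
instance (a : List Int) (n : Int) (out : List (List Int)) : Decidable (Spec_allptn a n out) := by unfold Spec_allptn; infer_instance

-- ===== CLAIM (what is proved, stated in full; the proofs are below) =====
def Claim_equal_allptn : Prop := ∀ (a : List Int) (n : Int), Dom_allptn a n → Spec_allptn a n (allptn a n)

-- ===== LEMMAS AND PROOFS =====

-- hand lists as multisets
def mco (c : List Int) : Multiset Int := (c : Multiset Int)

lemma mco_append (x y : List Int) : mco (x ++ y) = mco x + mco y := by simp [mco]

-- canonical sorted representative of a hand-multiset
def Hm (m : Multiset Int) : List Int := m.sort (· ≤ ·)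

-- all size-r sub-multisets (0 if r < 0, matching the empty index region)
def sing (r : Int) (t : Multiset Int) : Multiset (Multiset Int) :=
  if 0 ≤ r then Multiset.powersetCard r.toNat t else 0

-- Σ over all size-c sub-multisets C of t of f C (t - C)
def psum {γ : Type} [AddCommMonoid γ] (c : Nat) (t : Multiset Int)
    (f : Multiset Int → Multiset Int → γ) : γ :=
  ((Multiset.powersetCard c t).map (fun C => f C (t - C))).sum

-- the multiset of hand-multisets produced for fixed counts (it,jt,kt,r), offset b
def core (b s : Multiset Int) (it jt kt : Nat) (r : Int) : Multiset (Multiset Int) :=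
  psum it s (fun K t1 => psum jt t1 (fun P t2 => psum kt t2 (fun T t3 =>
    (sing r t3).map (fun S => b + 4 • K + 3 • P + 2 • T + S))))

-- all hands: triple sum over (i,j,k) exactly in A's ranges
def FF (b s : Multiset Int) (n : Int) : Multiset (Multiset Int) :=
  ((PySem.List.pyRange 0 (PySem.Int.floordiv n 4 + 1) 1).map (fun i =>
    ((PySem.List.pyRange 0 (PySem.Int.floordiv (n - 4 * i) 3 + 1) 1).map (fun j =>
      ((PySem.List.pyRange 0 (PySem.Int.floordiv (n - 4 * i - 3 * j) 2 + 1) 1).map (fun k =>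
        core b s i.toNat j.toNat k.toNat (n - 4 * i - 3 * j - 2 * k))).sum)).sum)).sum

-- A-side hand collections (sorted-list level)
def handsS (b : Multiset Int) (r : Int) (t : Multiset Int) : Multiset (List Int) :=
  (sing r t).map (fun S => Hm (b + S))
def handsT (b : Multiset Int) (kt : Nat) (r : Int) (t : Multiset Int) : Multiset (List Int) :=
  psum kt t (fun T t3 => handsS (b + 2 • T) r t3)
def handsP (b : Multiset Int) (jt kt : Nat) (r : Int) (t : Multiset Int) : Multiset (List Int) :=
  psum jt t (fun P t2 => handsT (b + 3 • P) kt r t2)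
def handsK (it jt kt : Nat) (r : Int) (t : Multiset Int) : Multiset (List Int) :=
  psum it t (fun K t1 => handsP (4 • K) jt kt r t1)

-- ---- small generic helpers ----
lemma msum_map {α β : Type} (S : Multiset (Multiset α)) (g : α → β) :
    S.sum.map g = (S.map (fun X => X.map g)).sum := by
  induction S using Multiset.induction_on with
  | empty => simp
  | cons x s ih => simp [ih]

lemma lsum_map {α β : Type} (L : List (Multiset α)) (g : α → β) :
    L.sum.map g = (L.map (fun X => X.map g)).sum := by
  induction L with
  | nil => simp
  | cons x l ih => simp [ih]

lemma lsum_zero {γ : Type} [AddCommMonoid γ] {β : Type} (L : List β) (f : β → γ)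
    (h : ∀ x ∈ L, f x = 0) : (L.map f).sum = 0 := by
  apply List.sum_eq_zero; intro x hx
  obtain ⟨y, hy, rfl⟩ := List.mem_map.mp hx
  exact h y hy

lemma psum_zero {γ : Type} [AddCommMonoid γ] (c : Nat) (t : Multiset Int) :
    psum c t (fun _ _ => (0 : γ)) = 0 := by
  simp [psum]

lemma psum_add {γ : Type} [AddCommMonoid γ] (c : Nat) (t : Multiset Int)
    (f g : Multiset Int → Multiset Int → γ) :
    psum c t (fun C u => f C u + g C u) = psum c t f + psum c t g := by
  simp [psum, Multiset.sum_map_add]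

lemma psum_congr {γ : Type} [AddCommMonoid γ] {c : Nat} {t : Multiset Int}
    {f g : Multiset Int → Multiset Int → γ}
    (h : ∀ C, C ≤ t → f C (t - C) = g C (t - C)) : psum c t f = psum c t g := by
  unfold psum
  congr 1
  apply Multiset.map_congr rfl
  intro C hC
  exact h C (Multiset.mem_powersetCard.mp hC).1

lemma psum_map_out {α β : Type} (c : Nat) (t : Multiset Int)
    (f : Multiset Int → Multiset Int → Multiset α) (g : α → β) :
    (psum c t f).map g = psum c t (fun C u => (f C u).map g) := by
  unfold psum
  rw [msum_map, Multiset.map_map]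
  rfl

lemma psum_cons {γ : Type} [AddCommMonoid γ] (c : Nat) (x : Int) (s : Multiset Int)
    (f : Multiset Int → Multiset Int → γ) :
    psum c (x ::ₘ s) f =
      (match c with
        | 0 => 0
        | c' + 1 => psum c' s (fun C u => f (x ::ₘ C) u)) +
      psum c s (fun C u => f C (x ::ₘ u)) := by
  cases c with
  | zero =>
    simp only [psum, Multiset.powersetCard_zero_left]
    simp
  | succ c' =>
    simp only [psum, Multiset.powersetCard_cons, Multiset.map_add, Multiset.sum_add,
      Multiset.map_map]
    rw [add_comm]
    congr 1
    · congr 1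
      apply Multiset.map_congr rfl
      intro C hC
      simp only [Function.comp_apply]
      congr 1
      rw [Multiset.sub_cons, Multiset.erase_cons_head]
    · congr 1
      apply Multiset.map_congr rfl
      intro C hC
      congr 1
      exact Multiset.cons_sub_of_le x (Multiset.mem_powersetCard.mp hC).1

-- ---- arithmetic helpers ----
lemma fd_sub_self (n w : Int) (hw : 0 < w) :
    PySem.Int.floordiv (n - w) w = PySem.Int.floordiv n w - 1 := by
  rw [PySem.Int.floordiv_eq_ediv_of_pos hw, PySem.Int.floordiv_eq_ediv_of_pos hw]
  have h : n - w = n + (-1) * w := by ring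
  rw [h, Int.add_mul_ediv_right _ _ (by omega : w ≠ 0)]
  omega

lemma fd_mono {a b : Int} (c : Int) (h : a ≤ b) (hc : 0 < c) :
    PySem.Int.floordiv a c ≤ PySem.Int.floordiv b c := by
  rw [PySem.Int.floordiv_eq_ediv_of_pos hc, PySem.Int.floordiv_eq_ediv_of_pos hc]
  exact Int.ediv_le_ediv hc h

lemma le_fd_iff {q a w : Int} (hw : 0 < w) : q ≤ PySem.Int.floordiv a w ↔ q * w ≤ a :=
  PySem.Int.le_floordiv_iff_mul_le hw

lemma le_fd_iff' (q a w : Int) (hw : 0 < w) : q ≤ PySem.Int.floordiv a w ↔ w * q ≤ a := by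
  rw [le_fd_iff hw, mul_comm]

lemma fd_neg {n w : Int} (hw : 0 < w) (hn : n < 0) : PySem.Int.floordiv n w + 1 ≤ 0 := by
  have h := (le_fd_iff hw (q := 0) (a := n))
  omega

-- ---- pyRange sum helpers ----
lemma pyRange_shift (c : Int) :
    PySem.List.pyRange 1 (c + 1) 1 = (PySem.List.pyRange 0 c 1).map (· + 1) := by
  rw [PySem.List.pyRange_one, PySem.List.pyRange_one]
  simp only [add_sub_cancel_right, Int.sub_zero, List.map_map, Function.comp_def]
  exact List.map_congr_left (fun k _ => by omega)

lemma sum_pyRange_trunc {γ : Type} [AddCommMonoid γ] (b1 b2 : Int) (f : Int → γ)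
    (hle : b2 ≤ b1) (hz : ∀ i, b2 ≤ i → i < b1 → f i = 0) :
    ((PySem.List.pyRange 0 b1 1).map f).sum = ((PySem.List.pyRange 0 b2 1).map f).sum := by
  by_cases h0 : 0 ≤ b2
  · rw [PySem.List.pyRange_one_append 0 b2 b1 h0 hle, List.map_append, List.sum_append]
    have h : ((PySem.List.pyRange b2 b1 1).map f).sum = 0 := by
      apply List.sum_eq_zero; intro x hx
      obtain ⟨y, hy, rfl⟩ := List.mem_map.mp hx
      have hm := PySem.List.mem_pyRange_one.mp hy
      exact hz y hm.1 hm.2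
    rw [h, add_zero]
  · rw [PySem.List.pyRange_one_eq_nil (by omega : b2 ≤ 0)]
    simp only [List.map_nil, List.sum_nil]
    apply List.sum_eq_zero; intro x hx
    obtain ⟨y, hy, rfl⟩ := List.mem_map.mp hx
    have hm := PySem.List.mem_pyRange_one.mp hy
    exact hz y (by omega) hm.2

-- ---- combi / removeAll facts ----
lemma coe_combi (r : Nat) (l : List Int) :
    (↑(List.map mco (combiNat l r)) : Multiset (Multiset Int)) =
      Multiset.powersetCard r ↑l := by
  induction l generalizing r with
  | nil => cases r <;> simp [combiNat, Multiset.powersetCard_zero_left] <;> rfl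
  | cons x t ih =>
    cases r with
    | zero => simp [combiNat, Multiset.powersetCard_zero_left]; rfl
    | succ r' =>
      have e1 : combiNat (x :: t) (r' + 1)
          = ((combiNat t r').map (fun c => x :: c)) ++ combiNat t (r' + 1) := rfl
      rw [e1, List.map_append, ← Multiset.coe_add, List.map_map]
      have e2 : (mco ∘ fun c => x :: c) = (fun C => x ::ₘ C) ∘ mco := by funext c; rfl
      rw [e2, ← List.map_map, ← Multiset.map_coe, ih r', ih (r' + 1)]
      rw [show ((x :: t : List Int) : Multiset Int) = x ::ₘ ↑t from rfl,
        Multiset.powersetCard_cons, add_comm]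

lemma mem_combi_le {c : List Int} {l : List Int} {r : Nat} (h : c ∈ combiNat l r) :
    mco c ≤ mco l := by
  have hm : mco c ∈ (↑(List.map mco (combiNat l r)) : Multiset (Multiset Int)) := by
    rw [Multiset.mem_coe]
    exact List.mem_map.mpr ⟨c, h, rfl⟩
  rw [coe_combi] at hm
  exact (Multiset.mem_powersetCard.mp hm).1

lemma combiSum {γ : Type} [AddCommMonoid γ] (t : List Int) (c : Nat)
    (Y : Multiset Int → Multiset Int → γ) :
    ((combiNat t c).map (fun v => Y (mco v) (mco t - mco v))).sum = psum c (mco t) Y := by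
  unfold psum
  have h : mco t = (↑t : Multiset Int) := rfl
  rw [h, ← coe_combi c t, ← Multiset.map_coe, Multiset.map_map, Multiset.map_coe,
    Multiset.sum_coe]
  rfl

lemma removeAll_coe : ∀ (es t : List Int), mco es ≤ mco t →
    mco (removeAll t es) = mco t - mco es := by
  intro es
  induction es with
  | nil => intro t _; simp [removeAll, mco]
  | cons e es ih =>
    intro t h
    have hmem : e ∈ t := by
      have hm : e ∈ mco t := Multiset.mem_of_le h (by simp [mco])
      simpa [mco, Multiset.mem_coe] using hm
    have hr : pyRemove t e = t.erase e := by
      simp [pyRemove, PySem.List.remove?_eq_some_erase t e hmem]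
    have hstep : removeAll t (e :: es) = removeAll (t.erase e) es := by
      simp [removeAll, hr]
    have hco : mco (t.erase e) = mco t - {e} := by
      simp [mco, Multiset.sub_singleton]
    have h2 : mco es ≤ mco (t.erase e) := by
      rw [hco]
      rw [Multiset.le_iff_count] at h ⊢
      intro a
      have ha := h a
      simp only [mco, ← Multiset.cons_coe, Multiset.count_cons] at ha ⊢
      by_cases he : a = e <;>
        simp [he] at ha ⊢ <;> omega
    rw [hstep, ih _ h2, hco]
    have h3 : mco (e :: es) = e ::ₘ mco es := rfl
    rw [h3, Multiset.sub_cons, Multiset.sub_singleton]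

-- ---- sorting bridge ----
lemma sortL_eq (l : List Int) : PySem.List.sorted l (fun x => x) false = Hm ↑l := by
  refine List.eq_of_perm_of_sorted (fun a b _ _ hab hba => le_antisymm hab hba) ?_ ?_ ?_
  · exact PySem.List.sorted_pairwise l (fun x => x)
  · exact Multiset.sort_sorted _ _
  · exact (PySem.List.sorted_perm l (fun x => x) false).trans
      (Multiset.coe_eq_coe.mp (Multiset.sort_eq (↑l : Multiset Int) (· ≤ ·))).symm

lemma ext_coe (g : Int → List Int) : ∀ (l init : List Int),
    mco (l.foldl (fun h e => h ++ g e) init) = mco init + (l.map (fun e => mco (g e))).sum := by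
  intro l
  induction l with
  | nil => intro init; simp
  | cons e l ih =>
    intro init
    simp only [List.foldl_cons, ih, List.map_cons, List.sum_cons]
    have h : mco (init ++ g e) = mco init + mco (g e) := by simp [mco]
    rw [h, add_assoc]

lemma sum_map_nsmul (c : Nat) : ∀ (l : List Int),
    (l.map (fun e => c • ({e} : Multiset Int))).sum = c • mco l := by
  intro l
  induction l with
  | nil => simp [mco]
  | cons e l ih =>
    simp only [List.map_cons, List.sum_cons, ih]
    have h : mco (e :: l) = {e} + mco l := by
      simp [mco, ← Multiset.cons_coe, ← Multiset.singleton_add]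
    rw [h, smul_add]

lemma buildHai_eq (kung pong toitsu single : List Int) :
    buildHai kung pong toitsu single =
      Hm (4 • mco kung + 3 • mco pong + 2 • mco toitsu + mco single) := by
  unfold buildHai
  rw [sortL_eq]
  congr 1
  have h4 : ∀ e : Int, mco [e, e, e, e] = 4 • ({e} : Multiset Int) := by
    intro e
    rw [show ([e,e,e,e] : List Int) = List.replicate 4 e from rfl]
    show ((List.replicate 4 e : List Int) : Multiset Int) = _
    rw [Multiset.coe_replicate, Multiset.nsmul_singleton]
  have h3 : ∀ e : Int, mco [e, e, e] = 3 • ({e} : Multiset Int) := by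
    intro e
    rw [show ([e,e,e] : List Int) = List.replicate 3 e from rfl]
    show ((List.replicate 3 e : List Int) : Multiset Int) = _
    rw [Multiset.coe_replicate, Multiset.nsmul_singleton]
  have h2 : ∀ e : Int, mco [e, e] = 2 • ({e} : Multiset Int) := by
    intro e
    rw [show ([e,e] : List Int) = List.replicate 2 e from rfl]
    show ((List.replicate 2 e : List Int) : Multiset Int) = _
    rw [Multiset.coe_replicate, Multiset.nsmul_singleton]
  have h1 : ∀ e : Int, mco [e] = 1 • ({e} : Multiset Int) := by
    intro e; simp [mco]
  show mco (single.foldl _ (toitsu.foldl _ (pong.foldl _ (kung.foldl _ [])))) = _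
  rw [ext_coe, ext_coe, ext_coe, ext_coe]
  have e4 : (kung.map (fun e => mco [e,e,e,e])).sum = 4 • mco kung := by
    rw [List.map_congr_left (fun e _ => h4 e), sum_map_nsmul]
  have e3 : (pong.map (fun e => mco [e,e,e])).sum = 3 • mco pong := by
    rw [List.map_congr_left (fun e _ => h3 e), sum_map_nsmul]
  have e2 : (toitsu.map (fun e => mco [e,e])).sum = 2 • mco toitsu := by
    rw [List.map_congr_left (fun e _ => h2 e), sum_map_nsmul]
  have e1 : (single.map (fun e => mco [e])).sum = mco single := by
    rw [List.map_congr_left (fun e _ => h1 e), sum_map_nsmul, one_smul]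
  rw [e4, e3, e2, e1]
  have e0 : mco [] = 0 := rfl
  rw [e0, zero_add]

-- instance alignment for the final sort over List (List Int)
lemma inst_fix (xs : List (List Int)) :
    @PySem.List.sorted (List Int) (List Int) List.instLT (fun a b => a.decidableLT b) xs (fun x => x) false
      = @PySem.List.sorted (List Int) (List Int) List.instLinearOrder.toLT
          (@LinearOrder.toDecidableLT _ List.instLinearOrder) xs (fun x => x) false := by
  congr 1

-- ---- A-side loop lemmas ----
lemma foldl_inv_add {β : Type} (body : List (List Int) × List Int → β → List (List Int) × List Int)
    (G : β → Multiset (List Int)) (tm : Multiset Int) :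
    ∀ (L : List β),
      (∀ st v, v ∈ L → mco st.2 = tm →
        mco (body st v).2 = tm ∧
        ((body st v).1 : Multiset (List Int)) = ↑st.1 + G v) →
      ∀ st : List (List Int) × List Int, mco st.2 = tm →
        mco (L.foldl body st).2 = tm ∧
        ((L.foldl body st).1 : Multiset (List Int)) = ↑st.1 + (L.map G).sum := by
  intro L
  induction L with
  | nil => intro _ st h2; exact ⟨h2, by simp⟩
  | cons v L ih =>
    intro hb st h2
    have hv := hb st v (by simp) h2
    have ihres := ih (fun st' w hw h2' => hb st' w (by simp [hw]) h2') (body st v) hv.1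
    refine ⟨ihres.1, ?_⟩
    rw [List.foldl_cons, ihres.2, hv.2]
    simp [add_assoc]

lemma singleLoop_spec (ret : List (List Int)) (kung pong toitsu t : List Int) (r : Int) (hr : 0 ≤ r) :
    ((singleLoop ret kung pong toitsu t r : List (List Int)) : Multiset (List Int)) =
      ↑ret + handsS (4 • mco kung + 3 • mco pong + 2 • mco toitsu) r (mco t) := by
  unfold singleLoop
  rw [PySem.List.foldl_append_singleton_eq_map]
  rw [← Multiset.coe_add]
  congr 1
  unfold handsS
  rw [show sing r (mco t) = Multiset.powersetCard r.toNat (mco t) by simp [sing, hr]]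
  rw [show mco t = (↑t : Multiset Int) from rfl, ← coe_combi, ← Multiset.map_coe, ← Multiset.map_coe,
    Multiset.map_map]
  apply Multiset.map_congr rfl
  intro c _
  exact buildHai_eq kung pong toitsu c

lemma toitsuLoop_spec (kung pong : List Int) (k r : Int) (hk : 0 ≤ k) (hr : 0 ≤ r)
    (st : List (List Int) × List Int) (tm : Multiset Int) (h2 : mco st.2 = tm) :
    mco (toitsuLoop st kung pong k r).2 = tm ∧
    ((toitsuLoop st kung pong k r).1 : Multiset (List Int)) =
      ↑st.1 + handsT (4 • mco kung + 3 • mco pong) k.toNat r tm := by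
  unfold toitsuLoop
  show mco (List.foldl (fun st toitsu =>
        (singleLoop st.1 kung pong toitsu (removeAll st.2 toitsu) r,
          removeAll st.2 toitsu ++ toitsu)) st (combi st.2 k)).2 = tm ∧
      ((List.foldl (fun st toitsu =>
        (singleLoop st.1 kung pong toitsu (removeAll st.2 toitsu) r,
          removeAll st.2 toitsu ++ toitsu)) st (combi st.2 k)).1 : Multiset (List Int)) =
        ↑st.1 + handsT (4 • mco kung + 3 • mco pong) k.toNat r tm
  have hres := foldl_inv_add (fun st toitsu =>
        (singleLoop st.1 kung pong toitsu (removeAll st.2 toitsu) r,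
          removeAll st.2 toitsu ++ toitsu))
      (fun v => handsS (4 • mco kung + 3 • mco pong + 2 • mco v) r (tm - mco v)) tm
      (combi st.2 k)
      (by
        intro st' v hv h2'
        have hvle : mco v ≤ tm := h2 ▸ mem_combi_le hv
        have hrm : mco (removeAll st'.2 v) = tm - mco v := by
          rw [removeAll_coe v st'.2 (h2' ▸ hvle), h2']
        refine ⟨?_, ?_⟩
        · show mco (removeAll st'.2 v ++ v) = tm
          rw [mco_append, hrm]
          exact Multiset.sub_add_cancel hvle
        · show ((singleLoop st'.1 kung pong v (removeAll st'.2 v) r : List (List Int)) : Multiset (List Int)) = _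
          rw [singleLoop_spec _ _ _ _ _ _ hr, hrm])
      st h2
  refine ⟨hres.1, ?_⟩
  rw [hres.2]
  congr 1
  unfold handsT
  have hc := combiSum st.2 k.toNat
    (fun T u => handsS (4 • mco kung + 3 • mco pong + 2 • T) r u)
  rw [h2] at hc
  unfold combi
  exact hc

lemma pongLoop_spec (kung : List Int) (j k r : Int) (hj : 0 ≤ j) (hk : 0 ≤ k) (hr : 0 ≤ r)
    (st : List (List Int) × List Int) (tm : Multiset Int) (h2 : mco st.2 = tm) :
    mco (pongLoop st kung j k r).2 = tm ∧
    ((pongLoop st kung j k r).1 : Multiset (List Int)) =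
      ↑st.1 + handsP (4 • mco kung) j.toNat k.toNat r tm := by
  unfold pongLoop
  show mco (List.foldl (fun st pong =>
        ((toitsuLoop (st.1, removeAll st.2 pong) kung pong k r).1,
          (toitsuLoop (st.1, removeAll st.2 pong) kung pong k r).2 ++ pong)) st (combi st.2 j)).2 = tm ∧
      ((List.foldl (fun st pong =>
        ((toitsuLoop (st.1, removeAll st.2 pong) kung pong k r).1,
          (toitsuLoop (st.1, removeAll st.2 pong) kung pong k r).2 ++ pong)) st (combi st.2 j)).1 : Multiset (List Int)) =
        ↑st.1 + handsP (4 • mco kung) j.toNat k.toNat r tm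
  have hres := foldl_inv_add (fun st pong =>
        ((toitsuLoop (st.1, removeAll st.2 pong) kung pong k r).1,
          (toitsuLoop (st.1, removeAll st.2 pong) kung pong k r).2 ++ pong))
      (fun v => handsT (4 • mco kung + 3 • mco v) k.toNat r (tm - mco v)) tm
      (combi st.2 j)
      (by
        intro st' v hv h2'
        have hvle : mco v ≤ tm := h2 ▸ mem_combi_le hv
        have hrm : mco (removeAll st'.2 v) = tm - mco v := by
          rw [removeAll_coe v st'.2 (h2' ▸ hvle), h2']
        have hin := toitsuLoop_spec kung v k r hk hr (st'.1, removeAll st'.2 v) (tm - mco v) hrm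
        refine ⟨?_, ?_⟩
        · show mco ((toitsuLoop (st'.1, removeAll st'.2 v) kung v k r).2 ++ v) = tm
          rw [mco_append, hin.1]
          exact Multiset.sub_add_cancel hvle
        · exact hin.2)
      st h2
  refine ⟨hres.1, ?_⟩
  rw [hres.2]
  congr 1
  unfold handsP
  have hc := combiSum st.2 j.toNat
    (fun P u => handsT (4 • mco kung + 3 • P) k.toNat r u)
  rw [h2] at hc
  unfold combi
  exact hc

lemma kungLoop_spec (i j k r : Int) (hi : 0 ≤ i) (hj : 0 ≤ j) (hk : 0 ≤ k) (hr : 0 ≤ r)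
    (st : List (List Int) × List Int) (tm : Multiset Int) (h2 : mco st.2 = tm) :
    mco (kungLoop st i j k r).2 = tm ∧
    ((kungLoop st i j k r).1 : Multiset (List Int)) =
      ↑st.1 + handsK i.toNat j.toNat k.toNat r tm := by
  unfold kungLoop
  show mco (List.foldl (fun st kung =>
        ((pongLoop (st.1, removeAll st.2 kung) kung j k r).1,
          (pongLoop (st.1, removeAll st.2 kung) kung j k r).2 ++ kung)) st (combi st.2 i)).2 = tm ∧
      ((List.foldl (fun st kung =>
        ((pongLoop (st.1, removeAll st.2 kung) kung j k r).1,
          (pongLoop (st.1, removeAll st.2 kung) kung j k r).2 ++ kung)) st (combi st.2 i)).1 : Multiset (List Int)) =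
        ↑st.1 + handsK i.toNat j.toNat k.toNat r tm
  have hres := foldl_inv_add (fun st kung =>
        ((pongLoop (st.1, removeAll st.2 kung) kung j k r).1,
          (pongLoop (st.1, removeAll st.2 kung) kung j k r).2 ++ kung))
      (fun v => handsP (4 • mco v) j.toNat k.toNat r (tm - mco v)) tm
      (combi st.2 i)
      (by
        intro st' v hv h2'
        have hvle : mco v ≤ tm := h2 ▸ mem_combi_le hv
        have hrm : mco (removeAll st'.2 v) = tm - mco v := by
          rw [removeAll_coe v st'.2 (h2' ▸ hvle), h2']
        have hin := pongLoop_spec v j k r hj hk hr (st'.1, removeAll st'.2 v) (tm - mco v) hrm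
        refine ⟨?_, ?_⟩
        · show mco ((pongLoop (st'.1, removeAll st'.2 v) v j k r).2 ++ v) = tm
          rw [mco_append, hin.1]
          exact Multiset.sub_add_cancel hvle
        · exact hin.2)
      st h2
  refine ⟨hres.1, ?_⟩
  rw [hres.2]
  congr 1
  unfold handsK
  have hc := combiSum st.2 i.toNat
    (fun K u => handsP (4 • K) j.toNat k.toNat r u)
  rw [h2] at hc
  unfold combi
  exact hc

lemma handsK_eq_core (it jt kt : Nat) (r : Int) (s : Multiset Int) :
    handsK it jt kt r s = (core 0 s it jt kt r).map Hm := by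
  unfold handsK core
  rw [psum_map_out]
  apply psum_congr; intro K _
  unfold handsP
  rw [psum_map_out]
  apply psum_congr; intro P _
  unfold handsT
  rw [psum_map_out]
  apply psum_congr; intro T _
  unfold handsS
  rw [Multiset.map_map]
  apply Multiset.map_congr rfl
  intro S _
  simp only [Function.comp_apply, zero_add]

lemma sumhands_eq (s : Multiset Int) (n : Int) :
    ((PySem.List.pyRange 0 (PySem.Int.floordiv n 4 + 1) 1).map (fun i =>
      ((PySem.List.pyRange 0 (PySem.Int.floordiv (n - 4 * i) 3 + 1) 1).map (fun j =>
        ((PySem.List.pyRange 0 (PySem.Int.floordiv (n - 4 * i - 3 * j) 2 + 1) 1).map (fun k =>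
          handsK i.toNat j.toNat k.toNat (n - 4 * i - 3 * j - 2 * k) s)).sum)).sum)).sum =
      (FF 0 s n).map Hm := by
  unfold FF
  rw [lsum_map, List.map_map]
  apply congrArg
  apply List.map_congr_left; intro i _
  rw [Function.comp_apply, lsum_map, List.map_map]
  apply congrArg
  apply List.map_congr_left; intro j _
  rw [Function.comp_apply, lsum_map, List.map_map]
  apply congrArg
  apply List.map_congr_left; intro k _
  rw [Function.comp_apply]
  exact handsK_eq_core _ _ _ _ s

-- A's accumulated result, as a multiset
lemma A_coe (a : List Int) (n : Int) :
    ((((PySem.List.pyRange 0 (PySem.Int.floordiv n 4 + 1) 1).foldl (fun st i =>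
      (PySem.List.pyRange 0 (PySem.Int.floordiv (n - 4 * i) 3 + 1) 1).foldl (fun st j =>
        (PySem.List.pyRange 0 (PySem.Int.floordiv (n - 4 * i - 3 * j) 2 + 1) 1).foldl (fun st k =>
          kungLoop st i j k (n - 4 * i - 3 * j - 2 * k)) st) st)
      (([] : List (List Int)), a)).1 : List (List Int)) : Multiset (List Int)) =
      (FF 0 (mco a) n).map Hm := by
  have houter := foldl_inv_add
    (fun st i => (PySem.List.pyRange 0 (PySem.Int.floordiv (n - 4 * i) 3 + 1) 1).foldl (fun st j =>
      (PySem.List.pyRange 0 (PySem.Int.floordiv (n - 4 * i - 3 * j) 2 + 1) 1).foldl (fun st k =>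
        kungLoop st i j k (n - 4 * i - 3 * j - 2 * k)) st) st)
    (fun i => ((PySem.List.pyRange 0 (PySem.Int.floordiv (n - 4 * i) 3 + 1) 1).map (fun j =>
      ((PySem.List.pyRange 0 (PySem.Int.floordiv (n - 4 * i - 3 * j) 2 + 1) 1).map (fun k =>
        handsK i.toNat j.toNat k.toNat (n - 4 * i - 3 * j - 2 * k) (mco a))).sum)).sum)
    (mco a) (PySem.List.pyRange 0 (PySem.Int.floordiv n 4 + 1) 1)
    (by
      intro st i hi h2
      have hi0 : 0 ≤ i := (PySem.List.mem_pyRange_one.mp hi).1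
      have hmid := foldl_inv_add
        (fun st j => (PySem.List.pyRange 0 (PySem.Int.floordiv (n - 4 * i - 3 * j) 2 + 1) 1).foldl
          (fun st k => kungLoop st i j k (n - 4 * i - 3 * j - 2 * k)) st)
        (fun j => ((PySem.List.pyRange 0 (PySem.Int.floordiv (n - 4 * i - 3 * j) 2 + 1) 1).map (fun k =>
          handsK i.toNat j.toNat k.toNat (n - 4 * i - 3 * j - 2 * k) (mco a))).sum)
        (mco a) (PySem.List.pyRange 0 (PySem.Int.floordiv (n - 4 * i) 3 + 1) 1)
        (by
          intro st j hj h2'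
          have hj0 : 0 ≤ j := (PySem.List.mem_pyRange_one.mp hj).1
          have hinner := foldl_inv_add
            (fun st k => kungLoop st i j k (n - 4 * i - 3 * j - 2 * k))
            (fun k => handsK i.toNat j.toNat k.toNat (n - 4 * i - 3 * j - 2 * k) (mco a))
            (mco a) (PySem.List.pyRange 0 (PySem.Int.floordiv (n - 4 * i - 3 * j) 2 + 1) 1)
            (by
              intro st k hk h2''
              have hk1 := PySem.List.mem_pyRange_one.mp hk
              have hk0 : 0 ≤ k := hk1.1
              have hr : 0 ≤ n - 4 * i - 3 * j - 2 * k := by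
                have := (le_fd_iff (by omega : (0:Int) < 2)
                  (q := k) (a := n - 4 * i - 3 * j)).mp (by omega)
                omega
              exact kungLoop_spec i j k _ hi0 hj0 hk0 hr st (mco a) h2'')
            st h2'
          exact hinner)
        st h2
      exact hmid)
    (([] : List (List Int)), a) rfl
  refine houter.2.trans ?_
  rw [show ((([] : List (List Int)) : List (List Int)) : Multiset (List Int)) = 0 from rfl,
    zero_add]
  exact sumhands_eq (mco a) n

-- ---- combinatorial heart ----
lemma sing_neg {r : Int} (t : Multiset Int) (hr : r < 0) : sing r t = 0 := by
  simp [sing, not_le.mpr hr]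

lemma sing_cons (r : Int) (x : Int) (t : Multiset Int) :
    sing r (x ::ₘ t) = (sing (r - 1) t).map (fun S => x ::ₘ S) + sing r t := by
  rcases lt_trichotomy r 0 with h | h | h
  · rw [sing_neg _ h, sing_neg _ (by omega), sing_neg _ h]; simp
  · subst h
    simp [sing, Multiset.powersetCard_zero_left, show ¬ ((0:Int) ≤ 0 - 1) by omega]
  · have h1 : (0:Int) ≤ r - 1 := by omega
    have h0 : (0:Int) ≤ r := by omega
    simp only [sing, if_pos h1, if_pos h0]
    have ht : r.toNat = (r - 1).toNat + 1 := by omega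
    rw [ht, Multiset.powersetCard_cons, add_comm]

lemma core_neg {r : Int} (b s : Multiset Int) (it jt kt : Nat) (hr : r < 0) :
    core b s it jt kt r = 0 := by
  have hz : ∀ t3 : Multiset Int, sing r t3 = 0 := fun t3 => sing_neg t3 hr
  simp only [core, hz, Multiset.map_zero, psum_zero]

lemma psum_nil {γ : Type} [AddCommMonoid γ] (c : Nat) (f : Multiset Int → Multiset Int → γ)
    (hc : c ≠ 0) : psum c (0 : Multiset Int) f = 0 := by
  rw [psum, Multiset.powersetCard_eq_empty c (by simp; omega)]
  simp

lemma psum_zero_nil {γ : Type} [AddCommMonoid γ] (f : Multiset Int → Multiset Int → γ) :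
    psum 0 (0 : Multiset Int) f = f 0 0 := by
  simp [psum, Multiset.powersetCard_zero_left]

lemma core_nil (b : Multiset Int) (it jt kt : Nat) (r : Int) :
    core b 0 it jt kt r = if it = 0 ∧ jt = 0 ∧ kt = 0 ∧ r = 0 then {b} else 0 := by
  cases it with
  | succ it' => rw [core, psum_nil _ _ (by omega), if_neg (by omega)]
  | zero =>
    rw [core, psum_zero_nil]
    cases jt with
    | succ jt' => rw [psum_nil _ _ (by omega), if_neg (by simp)]
    | zero =>
      rw [psum_zero_nil]
      cases kt with
      | succ kt' => rw [psum_nil _ _ (by omega), if_neg (by simp)]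
      | zero =>
        rw [psum_zero_nil]
        rcases lt_trichotomy r 0 with h | h | h
        · rw [sing_neg _ h, if_neg (by omega)]
          simp
        · subst h
          rw [if_pos (by simp)]
          simp [sing, Multiset.powersetCard_zero_left]
        · rw [if_neg (by omega)]
          rw [show sing r 0 = Multiset.powersetCard r.toNat 0 by simp [sing]; omega]
          rw [Multiset.powersetCard_eq_empty r.toNat (by simp; omega)]
          simp

lemma coreS_cons (B : Multiset Int) (x : Int) (t3 : Multiset Int) (r : Int) :
    (sing r (x ::ₘ t3)).map (fun S => B + S) =
      (sing (r - 1) t3).map (fun S => (B + {x}) + S) + (sing r t3).map (fun S => B + S) := by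
  rw [sing_cons, Multiset.map_add, Multiset.map_map]
  congr 1
  apply Multiset.map_congr rfl; intro S _
  show B + (x ::ₘ S) = B + {x} + S
  rw [← Multiset.singleton_add, ← add_assoc]

lemma coreT_cons (b : Multiset Int) (x : Int) (t : Multiset Int) (kt : Nat) (r : Int) :
    psum kt (x ::ₘ t) (fun T t3 => (sing r t3).map (fun S => b + 2 • T + S)) =
      (match kt with
        | 0 => (0 : Multiset (Multiset Int))
        | kt' + 1 => psum kt' t (fun T t3 => (sing r t3).map (fun S => (b + 2 • {x}) + 2 • T + S))) +
      psum kt t (fun T t3 => (sing (r - 1) t3).map (fun S => (b + {x}) + 2 • T + S)) +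
      psum kt t (fun T t3 => (sing r t3).map (fun S => b + 2 • T + S)) := by
  rw [psum_cons]
  have h2 : psum kt t (fun T u => (sing r (x ::ₘ u)).map (fun S => b + 2 • T + S)) =
      psum kt t (fun T u => (sing (r - 1) u).map (fun S => ((b + 2 • T) + {x}) + S) +
        (sing r u).map (fun S => (b + 2 • T) + S)) := by
    apply psum_congr; intro T _
    exact coreS_cons (b + 2 • T) x _ r
  rw [h2, psum_add]
  have hA : psum kt t (fun T u => (sing (r - 1) u).map (fun S => ((b + 2 • T) + {x}) + S)) =
      psum kt t (fun T t3 => (sing (r - 1) t3).map (fun S => (b + {x}) + 2 • T + S)) := by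
    apply psum_congr; intro T _
    apply Multiset.map_congr rfl; intro S _
    abel
  rw [hA]
  have hM : (match kt with
        | 0 => (0 : Multiset (Multiset Int))
        | kt' + 1 => psum kt' t (fun C u =>
            (fun T t3 => (sing r t3).map (fun S => b + 2 • T + S)) (x ::ₘ C) u)) =
      (match kt with
        | 0 => (0 : Multiset (Multiset Int))
        | kt' + 1 => psum kt' t (fun T t3 => (sing r t3).map (fun S => (b + 2 • {x}) + 2 • T + S))) := by
    cases kt with
    | zero => rfl
    | succ kt' =>
      apply psum_congr; intro T _
      apply Multiset.map_congr rfl; intro S _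
      show b + 2 • (x ::ₘ T) + S = _
      rw [Multiset.nsmul_cons]
      abel
  rw [hM, ← add_assoc]

lemma coreJ_cons (b : Multiset Int) (x : Int) (t : Multiset Int) (jt kt : Nat) (r : Int) :
    psum jt (x ::ₘ t) (fun P t2 => psum kt t2 (fun T t3 =>
        (sing r t3).map (fun S => b + 3 • P + 2 • T + S))) =
      (match jt with
        | 0 => (0 : Multiset (Multiset Int))
        | jt' + 1 => psum jt' t (fun P t2 => psum kt t2 (fun T t3 =>
            (sing r t3).map (fun S => (b + 3 • {x}) + 3 • P + 2 • T + S)))) +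
      (match kt with
        | 0 => (0 : Multiset (Multiset Int))
        | kt' + 1 => psum jt t (fun P t2 => psum kt' t2 (fun T t3 =>
            (sing r t3).map (fun S => (b + 2 • {x}) + 3 • P + 2 • T + S)))) +
      psum jt t (fun P t2 => psum kt t2 (fun T t3 =>
        (sing (r - 1) t3).map (fun S => (b + {x}) + 3 • P + 2 • T + S))) +
      psum jt t (fun P t2 => psum kt t2 (fun T t3 =>
        (sing r t3).map (fun S => b + 3 • P + 2 • T + S))) := by
  rw [psum_cons]
  have h2 : psum jt t (fun P u => psum kt (x ::ₘ u) (fun T t3 =>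
        (sing r t3).map (fun S => b + 3 • P + 2 • T + S))) =
      psum jt t (fun P u =>
        ((match kt with
          | 0 => (0 : Multiset (Multiset Int))
          | kt' + 1 => psum kt' u (fun T t3 =>
              (sing r t3).map (fun S => ((b + 3 • P) + 2 • {x}) + 2 • T + S))) +
         psum kt u (fun T t3 => (sing (r - 1) t3).map (fun S => ((b + 3 • P) + {x}) + 2 • T + S))) +
        psum kt u (fun T t3 => (sing r t3).map (fun S => (b + 3 • P) + 2 • T + S))) := by
    apply psum_congr; intro P _
    exact coreT_cons (b + 3 • P) x _ kt r
  rw [h2, psum_add, psum_add]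
  have hM : (match jt with
        | 0 => (0 : Multiset (Multiset Int))
        | jt' + 1 => psum jt' t (fun C u =>
            (fun P t2 => psum kt t2 (fun T t3 =>
              (sing r t3).map (fun S => b + 3 • P + 2 • T + S))) (x ::ₘ C) u)) =
      (match jt with
        | 0 => (0 : Multiset (Multiset Int))
        | jt' + 1 => psum jt' t (fun P t2 => psum kt t2 (fun T t3 =>
            (sing r t3).map (fun S => (b + 3 • {x}) + 3 • P + 2 • T + S)))) := by
    cases jt with
    | zero => rfl
    | succ jt' =>
      apply psum_congr; intro P _
      apply psum_congr; intro T _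
      apply Multiset.map_congr rfl; intro S _
      show b + 3 • (x ::ₘ P) + 2 • T + S = _
      rw [Multiset.nsmul_cons]
      abel
  rw [hM]
  have hK : psum jt t (fun P u => (match kt with
        | 0 => (0 : Multiset (Multiset Int))
        | kt' + 1 => psum kt' u (fun T t3 =>
            (sing r t3).map (fun S => ((b + 3 • P) + 2 • {x}) + 2 • T + S)))) =
      (match kt with
        | 0 => (0 : Multiset (Multiset Int))
        | kt' + 1 => psum jt t (fun P t2 => psum kt' t2 (fun T t3 =>
            (sing r t3).map (fun S => (b + 2 • {x}) + 3 • P + 2 • T + S)))) := by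
    cases kt with
    | zero => exact psum_zero _ _
    | succ kt' =>
      apply psum_congr; intro P _
      apply psum_congr; intro T _
      apply Multiset.map_congr rfl; intro S _
      abel
  have hS : psum jt t (fun P u => psum kt u (fun T t3 =>
        (sing (r - 1) t3).map (fun S => ((b + 3 • P) + {x}) + 2 • T + S))) =
      psum jt t (fun P t2 => psum kt t2 (fun T t3 =>
        (sing (r - 1) t3).map (fun S => (b + {x}) + 3 • P + 2 • T + S))) := by
    apply psum_congr; intro P _
    apply psum_congr; intro T _
    apply Multiset.map_congr rfl; intro S _
    abel
  rw [hK, hS]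
  simp only [add_assoc]
  congr 1
  cases jt <;> rfl

lemma core_cons (b : Multiset Int) (x : Int) (s : Multiset Int) (it jt kt : Nat) (r : Int) :
    core b (x ::ₘ s) it jt kt r =
      (match it with
        | 0 => (0 : Multiset (Multiset Int))
        | it' + 1 => core (b + 4 • {x}) s it' jt kt r) +
      (match jt with
        | 0 => 0
        | jt' + 1 => core (b + 3 • {x}) s it jt' kt r) +
      (match kt with
        | 0 => 0
        | kt' + 1 => core (b + 2 • {x}) s it jt kt' r) +
      core (b + {x}) s it jt kt (r - 1) +
      core b s it jt kt r := by
  unfold core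
  rw [psum_cons]
  have h2 : psum it s (fun K u => psum jt (x ::ₘ u) (fun P t2 => psum kt t2 (fun T t3 =>
        (sing r t3).map (fun S => b + 4 • K + 3 • P + 2 • T + S)))) =
      psum it s (fun K u =>
        (((match jt with
            | 0 => (0 : Multiset (Multiset Int))
            | jt' + 1 => psum jt' u (fun P t2 => psum kt t2 (fun T t3 =>
                (sing r t3).map (fun S => ((b + 4 • K) + 3 • {x}) + 3 • P + 2 • T + S)))) +
          (match kt with
            | 0 => (0 : Multiset (Multiset Int))
            | kt' + 1 => psum jt u (fun P t2 => psum kt' t2 (fun T t3 =>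
                (sing r t3).map (fun S => ((b + 4 • K) + 2 • {x}) + 3 • P + 2 • T + S))))) +
          (psum jt u (fun P t2 => psum kt t2 (fun T t3 =>
            (sing (r - 1) t3).map (fun S => ((b + 4 • K) + {x}) + 3 • P + 2 • T + S))))) +
          (psum jt u (fun P t2 => psum kt t2 (fun T t3 =>
            (sing r t3).map (fun S => (b + 4 • K) + 3 • P + 2 • T + S))))) := by
    apply psum_congr; intro K _
    exact coreJ_cons (b + 4 • K) x _ jt kt r
  rw [h2, psum_add, psum_add, psum_add]
  have hM : (match it with
        | 0 => (0 : Multiset (Multiset Int))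
        | it' + 1 => psum it' s (fun C u =>
            (fun K t1 => psum jt t1 (fun P t2 => psum kt t2 (fun T t3 =>
              (sing r t3).map (fun S => b + 4 • K + 3 • P + 2 • T + S)))) (x ::ₘ C) u)) =
      (match it with
        | 0 => (0 : Multiset (Multiset Int))
        | it' + 1 => psum it' s (fun K t1 => psum jt t1 (fun P t2 => psum kt t2 (fun T t3 =>
            (sing r t3).map (fun S => (b + 4 • {x}) + 4 • K + 3 • P + 2 • T + S))))) := by
    cases it with
    | zero => rfl
    | succ it' =>
      apply psum_congr; intro K _
      apply psum_congr; intro P _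
      apply psum_congr; intro T _
      apply Multiset.map_congr rfl; intro S _
      show b + 4 • (x ::ₘ K) + 3 • P + 2 • T + S = _
      rw [Multiset.nsmul_cons]
      abel
  rw [hM]
  have hJ : psum it s (fun K u => (match jt with
        | 0 => (0 : Multiset (Multiset Int))
        | jt' + 1 => psum jt' u (fun P t2 => psum kt t2 (fun T t3 =>
            (sing r t3).map (fun S => ((b + 4 • K) + 3 • {x}) + 3 • P + 2 • T + S))))) =
      (match jt with
        | 0 => (0 : Multiset (Multiset Int))
        | jt' + 1 => psum it s (fun K t1 => psum jt' t1 (fun P t2 => psum kt t2 (fun T t3 =>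
            (sing r t3).map (fun S => (b + 3 • {x}) + 4 • K + 3 • P + 2 • T + S))))) := by
    cases jt with
    | zero => exact psum_zero _ _
    | succ jt' =>
      apply psum_congr; intro K _
      apply psum_congr; intro P _
      apply psum_congr; intro T _
      apply Multiset.map_congr rfl; intro S _
      abel
  have hK : psum it s (fun K u => (match kt with
        | 0 => (0 : Multiset (Multiset Int))
        | kt' + 1 => psum jt u (fun P t2 => psum kt' t2 (fun T t3 =>
            (sing r t3).map (fun S => ((b + 4 • K) + 2 • {x}) + 3 • P + 2 • T + S))))) =
      (match kt with
        | 0 => (0 : Multiset (Multiset Int))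
        | kt' + 1 => psum it s (fun K t1 => psum jt t1 (fun P t2 => psum kt' t2 (fun T t3 =>
            (sing r t3).map (fun S => (b + 2 • {x}) + 4 • K + 3 • P + 2 • T + S))))) := by
    cases kt with
    | zero => exact psum_zero _ _
    | succ kt' =>
      apply psum_congr; intro K _
      apply psum_congr; intro P _
      apply psum_congr; intro T _
      apply Multiset.map_congr rfl; intro S _
      abel
  have hS : psum it s (fun K u => psum jt u (fun P t2 => psum kt t2 (fun T t3 =>
        (sing (r - 1) t3).map (fun S => ((b + 4 • K) + {x}) + 3 • P + 2 • T + S)))) =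
      psum it s (fun K t1 => psum jt t1 (fun P t2 => psum kt t2 (fun T t3 =>
        (sing (r - 1) t3).map (fun S => (b + {x}) + 4 • K + 3 • P + 2 • T + S)))) := by
    apply psum_congr; intro K _
    apply psum_congr; intro P _
    apply psum_congr; intro T _
    apply Multiset.map_congr rfl; intro S _
    abel
  rw [hJ, hK, hS]
  simp only [add_assoc]
  congr 1
  cases it <;> rfl

lemma FF_neg (b s : Multiset Int) {n : Int} (hn : n < 0) : FF b s n = 0 := by
  rw [FF, PySem.List.pyRange_one_eq_nil (fd_neg (by omega) hn)]
  rfl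

lemma FF_nil (b : Multiset Int) (n : Int) :
    FF b 0 n = if n = 0 then ({b} : Multiset (Multiset Int)) else 0 := by
  rcases lt_trichotomy n 0 with h | h | h
  · rw [FF_neg b 0 h, if_neg (by omega)]
  · subst h
    rw [if_pos rfl, FF]
    rw [show PySem.List.pyRange 0 (PySem.Int.floordiv 0 4 + 1) 1 = [0] from by decide]
    simp only [List.map_cons, List.map_nil, List.sum_cons, List.sum_nil, add_zero]
    rw [show PySem.List.pyRange 0 (PySem.Int.floordiv (0 - 4 * 0) 3 + 1) 1 = [0] from by decide]
    simp only [List.map_cons, List.map_nil, List.sum_cons, List.sum_nil, add_zero]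
    rw [show PySem.List.pyRange 0 (PySem.Int.floordiv (0 - 4 * 0 - 3 * 0) 2 + 1) 1 = [0]
      from by decide]
    simp only [List.map_cons, List.map_nil, List.sum_cons, List.sum_nil, add_zero]
    rw [core_nil, if_pos]
    refine ⟨by norm_num, by norm_num, by norm_num, by norm_num⟩
  · rw [if_neg (by omega), FF]
    apply lsum_zero
    intro i hi
    have hi0 := PySem.List.mem_pyRange_one.mp hi
    apply lsum_zero
    intro j hj
    have hj0 := PySem.List.mem_pyRange_one.mp hj
    apply lsum_zero
    intro k hk
    have hk0 := PySem.List.mem_pyRange_one.mp hk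
    rw [core_nil, if_neg]
    rintro ⟨h1, h2, h3, h4⟩
    omega

lemma sum_shift_level {γ : Type} [AddCommMonoid γ] (c : Int) (hc : 0 ≤ c) (f : Int → γ) :
    ((PySem.List.pyRange 0 (c + 1) 1).map f).sum =
      f 0 + ((PySem.List.pyRange 0 c 1).map (fun i => f (i + 1))).sum := by
  rw [PySem.List.pyRange_one_cons (by omega)]
  simp only [zero_add]
  rw [pyRange_shift, List.map_cons, List.sum_cons, List.map_map]
  rfl

lemma fd_nonneg {m w : Int} (hm : 0 ≤ m) (hw : 0 < w) : 0 ≤ PySem.Int.floordiv m w :=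
  (le_fd_iff' 0 m w hw).mpr (by omega)

lemma piece4 (b : Multiset Int) (x : Int) (s : Multiset Int) (n : Int) :
    ((PySem.List.pyRange 0 (PySem.Int.floordiv n 4 + 1) 1).map (fun i =>
      ((PySem.List.pyRange 0 (PySem.Int.floordiv (n - 4 * i) 3 + 1) 1).map (fun j =>
        ((PySem.List.pyRange 0 (PySem.Int.floordiv (n - 4 * i - 3 * j) 2 + 1) 1).map (fun k =>
          (match i.toNat with
            | 0 => (0 : Multiset (Multiset Int))
            | it' + 1 => core (b + 4 • {x}) s it' j.toNat k.toNat
                (n - 4 * i - 3 * j - 2 * k)))).sum)).sum)).sum =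
      FF (b + 4 • {x}) s (n - 4) := by
  by_cases hn : 0 ≤ n
  · rw [show PySem.Int.floordiv n 4 + 1 = (PySem.Int.floordiv (n - 4) 4 + 1) + 1 from by
      have := fd_sub_self n 4 (by omega); omega]
    rw [sum_shift_level _ (by
      have : -1 ≤ PySem.Int.floordiv (n - 4) 4 := (le_fd_iff' (-1) (n - 4) 4 (by omega)).mpr (by omega)
      omega)]
    have h0 : ((PySem.List.pyRange 0 (PySem.Int.floordiv (n - 4 * 0) 3 + 1) 1).map (fun j =>
        ((PySem.List.pyRange 0 (PySem.Int.floordiv (n - 4 * 0 - 3 * j) 2 + 1) 1).map (fun k =>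
          (match (0 : Int).toNat with
            | 0 => (0 : Multiset (Multiset Int))
            | it' + 1 => core (b + 4 • {x}) s it' j.toNat k.toNat
                (n - 4 * 0 - 3 * j - 2 * k)))).sum)).sum = 0 := by
      apply lsum_zero; intro j _
      apply lsum_zero; intro k _
      rfl
    rw [h0, zero_add, FF]
    apply congrArg
    apply List.map_congr_left; intro i' hi'
    have hi0 : 0 ≤ i' := (PySem.List.mem_pyRange_one.mp hi').1
    have ht : (i' + 1).toNat = i'.toNat + 1 := by omega
    simp only [ht, show n - 4 * (i' + 1) = n - 4 - 4 * i' from by ring]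
  · rw [PySem.List.pyRange_one_eq_nil (fd_neg (by omega) (by omega)),
      FF_neg _ _ (by omega : n - 4 < 0)]
    rfl

lemma piece3 (b : Multiset Int) (x : Int) (s : Multiset Int) (n : Int) :
    ((PySem.List.pyRange 0 (PySem.Int.floordiv n 4 + 1) 1).map (fun i =>
      ((PySem.List.pyRange 0 (PySem.Int.floordiv (n - 4 * i) 3 + 1) 1).map (fun j =>
        ((PySem.List.pyRange 0 (PySem.Int.floordiv (n - 4 * i - 3 * j) 2 + 1) 1).map (fun k =>
          (match j.toNat with
            | 0 => (0 : Multiset (Multiset Int))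
            | jt' + 1 => core (b + 3 • {x}) s i.toNat jt' k.toNat
                (n - 4 * i - 3 * j - 2 * k)))).sum)).sum)).sum =
      FF (b + 3 • {x}) s (n - 3) := by
  by_cases hn : 0 ≤ n
  · rw [sum_pyRange_trunc (PySem.Int.floordiv n 4 + 1) (PySem.Int.floordiv (n - 3) 4 + 1) _
      (by have := fd_mono 4 (by omega : n - 3 ≤ n) (by omega); omega)
      (by
        intro i h2 h1
        have hup : 4 * i ≤ n := (le_fd_iff' i n 4 (by omega)).mp (by omega)
        have hlow : ¬ (i ≤ PySem.Int.floordiv (n - 3) 4) := by omega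
        have hlow2 : ¬ (4 * i ≤ n - 3) := fun hc => hlow ((le_fd_iff' _ _ _ (by omega)).mpr (by omega))
        apply lsum_zero; intro j hj
        have hjm := PySem.List.mem_pyRange_one.mp hj
        have hj3 : 3 * j ≤ n - 4 * i := (le_fd_iff' j (n - 4 * i) 3 (by omega)).mp (by omega)
        have hj0 : j = 0 := by omega
        subst hj0
        apply lsum_zero; intro k _
        rfl)]
    rw [FF]
    apply congrArg
    apply List.map_congr_left; intro i hi
    have him := PySem.List.mem_pyRange_one.mp hi
    have hi0 : 0 ≤ i := him.1
    have hi3 : 4 * i ≤ n - 3 := (le_fd_iff' i (n - 3) 4 (by omega)).mp (by omega)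
    rw [show PySem.Int.floordiv (n - 4 * i) 3 + 1
        = (PySem.Int.floordiv (n - 3 - 4 * i) 3 + 1) + 1 from by
      have := fd_sub_self (n - 4 * i) 3 (by omega)
      have h2 : n - 4 * i - 3 = n - 3 - 4 * i := by ring
      rw [h2] at this; omega]
    rw [sum_shift_level _ (by
      have : 0 ≤ PySem.Int.floordiv (n - 3 - 4 * i) 3 := fd_nonneg (by omega) (by omega)
      omega)]
    have h0 : ((PySem.List.pyRange 0 (PySem.Int.floordiv (n - 4 * i - 3 * 0) 2 + 1) 1).map
        (fun k => (match (0 : Int).toNat with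
          | 0 => (0 : Multiset (Multiset Int))
          | jt' + 1 => core (b + 3 • {x}) s i.toNat jt' k.toNat
              (n - 4 * i - 3 * 0 - 2 * k)))).sum = 0 := by
      apply lsum_zero; intro k _
      rfl
    rw [h0, zero_add]
    apply congrArg
    apply List.map_congr_left; intro j' hj'
    have hj0 : 0 ≤ j' := (PySem.List.mem_pyRange_one.mp hj').1
    have ht : (j' + 1).toNat = j'.toNat + 1 := by omega
    simp only [ht, show n - 4 * i - 3 * (j' + 1) = n - 3 - 4 * i - 3 * j' from by ring]
  · rw [PySem.List.pyRange_one_eq_nil (fd_neg (by omega) (by omega)),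
      FF_neg _ _ (by omega : n - 3 < 0)]
    rfl

lemma piece2 (b : Multiset Int) (x : Int) (s : Multiset Int) (n : Int) :
    ((PySem.List.pyRange 0 (PySem.Int.floordiv n 4 + 1) 1).map (fun i =>
      ((PySem.List.pyRange 0 (PySem.Int.floordiv (n - 4 * i) 3 + 1) 1).map (fun j =>
        ((PySem.List.pyRange 0 (PySem.Int.floordiv (n - 4 * i - 3 * j) 2 + 1) 1).map (fun k =>
          (match k.toNat with
            | 0 => (0 : Multiset (Multiset Int))
            | kt' + 1 => core (b + 2 • {x}) s i.toNat j.toNat kt'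
                (n - 4 * i - 3 * j - 2 * k)))).sum)).sum)).sum =
      FF (b + 2 • {x}) s (n - 2) := by
  by_cases hn : 0 ≤ n
  · rw [sum_pyRange_trunc (PySem.Int.floordiv n 4 + 1) (PySem.Int.floordiv (n - 2) 4 + 1) _
      (by have := fd_mono 4 (by omega : n - 2 ≤ n) (by omega); omega)
      (by
        intro i h2 h1
        have hup : 4 * i ≤ n := (le_fd_iff' i n 4 (by omega)).mp (by omega)
        have hlow : ¬ (i ≤ PySem.Int.floordiv (n - 2) 4) := by omega
        have hlow2 : ¬ (4 * i ≤ n - 2) := fun hc => hlow ((le_fd_iff' _ _ _ (by omega)).mpr (by omega))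
        apply lsum_zero; intro j hj
        have hjm := PySem.List.mem_pyRange_one.mp hj
        have hj3 : 3 * j ≤ n - 4 * i := (le_fd_iff' j (n - 4 * i) 3 (by omega)).mp (by omega)
        apply lsum_zero; intro k hk
        have hkm := PySem.List.mem_pyRange_one.mp hk
        have hk2 : 2 * k ≤ n - 4 * i - 3 * j := (le_fd_iff' k (n - 4 * i - 3 * j) 2 (by omega)).mp (by omega)
        have hk0 : k = 0 := by omega
        subst hk0
        rfl)]
    rw [FF]
    apply congrArg
    apply List.map_congr_left; intro i hi
    have him := PySem.List.mem_pyRange_one.mp hi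
    have hi0 : 0 ≤ i := him.1
    have hi2 : 4 * i ≤ n - 2 := (le_fd_iff' i (n - 2) 4 (by omega)).mp (by omega)
    rw [sum_pyRange_trunc (PySem.Int.floordiv (n - 4 * i) 3 + 1)
      (PySem.Int.floordiv (n - 2 - 4 * i) 3 + 1) _
      (by
        have := fd_mono 3 (by omega : n - 2 - 4 * i ≤ n - 4 * i) (by omega)
        omega)
      (by
        intro j h2 h1
        have hju : 3 * j ≤ n - 4 * i := (le_fd_iff' j (n - 4 * i) 3 (by omega)).mp (by omega)
        have hlow : ¬ (j ≤ PySem.Int.floordiv (n - 2 - 4 * i) 3) := by omega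
        have hlow2 : ¬ (3 * j ≤ n - 2 - 4 * i) := fun hc => hlow ((le_fd_iff' _ _ _ (by omega)).mpr (by omega))
        apply lsum_zero; intro k hk
        have hkm := PySem.List.mem_pyRange_one.mp hk
        have hk2 : 2 * k ≤ n - 4 * i - 3 * j := (le_fd_iff' k (n - 4 * i - 3 * j) 2 (by omega)).mp (by omega)
        have hk0 : k = 0 := by omega
        subst hk0
        rfl)]
    apply congrArg
    apply List.map_congr_left; intro j hj
    have hjm := PySem.List.mem_pyRange_one.mp hj
    have hj0 : 0 ≤ j := hjm.1
    have hj2 : 3 * j ≤ n - 2 - 4 * i := (le_fd_iff' j (n - 2 - 4 * i) 3 (by omega)).mp (by omega)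
    rw [show PySem.Int.floordiv (n - 4 * i - 3 * j) 2 + 1
        = (PySem.Int.floordiv (n - 2 - 4 * i - 3 * j) 2 + 1) + 1 from by
      have := fd_sub_self (n - 4 * i - 3 * j) 2 (by omega)
      have h2 : n - 4 * i - 3 * j - 2 = n - 2 - 4 * i - 3 * j := by ring
      rw [h2] at this; omega]
    rw [sum_shift_level _ (by
      have : 0 ≤ PySem.Int.floordiv (n - 2 - 4 * i - 3 * j) 2 := fd_nonneg (by omega) (by omega)
      omega)]
    have h0 : (match (0 : Int).toNat with
        | 0 => (0 : Multiset (Multiset Int))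
        | kt' + 1 => core (b + 2 • {x}) s i.toNat j.toNat kt'
            (n - 4 * i - 3 * j - 2 * 0)) = 0 := rfl
    rw [h0, zero_add]
    apply congrArg
    apply List.map_congr_left; intro k' hk'
    have hk0 : 0 ≤ k' := (PySem.List.mem_pyRange_one.mp hk').1
    have ht : (k' + 1).toNat = k'.toNat + 1 := by omega
    simp only [ht, show n - 4 * i - 3 * j - 2 * (k' + 1) = n - 2 - 4 * i - 3 * j - 2 * k'
      from by ring]
  · rw [PySem.List.pyRange_one_eq_nil (fd_neg (by omega) (by omega)),
      FF_neg _ _ (by omega : n - 2 < 0)]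
    rfl

lemma piece1 (b : Multiset Int) (x : Int) (s : Multiset Int) (n : Int) :
    ((PySem.List.pyRange 0 (PySem.Int.floordiv n 4 + 1) 1).map (fun i =>
      ((PySem.List.pyRange 0 (PySem.Int.floordiv (n - 4 * i) 3 + 1) 1).map (fun j =>
        ((PySem.List.pyRange 0 (PySem.Int.floordiv (n - 4 * i - 3 * j) 2 + 1) 1).map (fun k =>
          core (b + {x}) s i.toNat j.toNat k.toNat
            (n - 4 * i - 3 * j - 2 * k - 1))).sum)).sum)).sum =
      FF (b + {x}) s (n - 1) := by
  by_cases hn : 0 ≤ n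
  · rw [sum_pyRange_trunc (PySem.Int.floordiv n 4 + 1) (PySem.Int.floordiv (n - 1) 4 + 1) _
      (by have := fd_mono 4 (by omega : n - 1 ≤ n) (by omega); omega)
      (by
        intro i h2 h1
        have hup : 4 * i ≤ n := (le_fd_iff' i n 4 (by omega)).mp (by omega)
        have hlow : ¬ (i ≤ PySem.Int.floordiv (n - 1) 4) := by omega
        have hlow2 : ¬ (4 * i ≤ n - 1) := fun hc => hlow ((le_fd_iff' _ _ _ (by omega)).mpr (by omega))
        apply lsum_zero; intro j hj
        have hjm := PySem.List.mem_pyRange_one.mp hj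
        have hj3 : 3 * j ≤ n - 4 * i := (le_fd_iff' j (n - 4 * i) 3 (by omega)).mp (by omega)
        apply lsum_zero; intro k hk
        have hkm := PySem.List.mem_pyRange_one.mp hk
        have hk2 : 2 * k ≤ n - 4 * i - 3 * j := (le_fd_iff' k (n - 4 * i - 3 * j) 2 (by omega)).mp (by omega)
        exact core_neg _ _ _ _ _ (by omega))]
    rw [FF]
    apply congrArg
    apply List.map_congr_left; intro i hi
    have him := PySem.List.mem_pyRange_one.mp hi
    have hi0 : 0 ≤ i := him.1
    have hi1 : 4 * i ≤ n - 1 := (le_fd_iff' i (n - 1) 4 (by omega)).mp (by omega)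
    rw [sum_pyRange_trunc (PySem.Int.floordiv (n - 4 * i) 3 + 1)
      (PySem.Int.floordiv (n - 1 - 4 * i) 3 + 1) _
      (by
        have := fd_mono 3 (by omega : n - 1 - 4 * i ≤ n - 4 * i) (by omega)
        omega)
      (by
        intro j h2 h1
        have hju : 3 * j ≤ n - 4 * i := (le_fd_iff' j (n - 4 * i) 3 (by omega)).mp (by omega)
        have hlow : ¬ (j ≤ PySem.Int.floordiv (n - 1 - 4 * i) 3) := by omega
        have hlow2 : ¬ (3 * j ≤ n - 1 - 4 * i) := fun hc => hlow ((le_fd_iff' _ _ _ (by omega)).mpr (by omega))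
        apply lsum_zero; intro k hk
        have hkm := PySem.List.mem_pyRange_one.mp hk
        have hk2 : 2 * k ≤ n - 4 * i - 3 * j := (le_fd_iff' k (n - 4 * i - 3 * j) 2 (by omega)).mp (by omega)
        exact core_neg _ _ _ _ _ (by omega))]
    apply congrArg
    apply List.map_congr_left; intro j hj
    have hjm := PySem.List.mem_pyRange_one.mp hj
    have hj0 : 0 ≤ j := hjm.1
    have hj1 : 3 * j ≤ n - 1 - 4 * i := (le_fd_iff' j (n - 1 - 4 * i) 3 (by omega)).mp (by omega)
    rw [sum_pyRange_trunc (PySem.Int.floordiv (n - 4 * i - 3 * j) 2 + 1)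
      (PySem.Int.floordiv (n - 1 - 4 * i - 3 * j) 2 + 1) _
      (by
        have := fd_mono 2 (by omega : n - 1 - 4 * i - 3 * j ≤ n - 4 * i - 3 * j) (by omega)
        omega)
      (by
        intro k h2 h1
        have hku : 2 * k ≤ n - 4 * i - 3 * j := (le_fd_iff' k (n - 4 * i - 3 * j) 2 (by omega)).mp (by omega)
        have hlow : ¬ (k ≤ PySem.Int.floordiv (n - 1 - 4 * i - 3 * j) 2) := by omega
        have hlow2 : ¬ (2 * k ≤ n - 1 - 4 * i - 3 * j) := fun hc => hlow ((le_fd_iff' _ _ _ (by omega)).mpr (by omega))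
        exact core_neg _ _ _ _ _ (by omega))]
    apply congrArg
    apply List.map_congr_left; intro k hk
    simp only [show n - 4 * i - 3 * j - 2 * k - 1 = n - 1 - 4 * i - 3 * j - 2 * k from by ring]
  · rw [PySem.List.pyRange_one_eq_nil (fd_neg (by omega) (by omega)),
      FF_neg _ _ (by omega : n - 1 < 0)]
    rfl

set_option maxHeartbeats 1000000 in
lemma FF_cons (b : Multiset Int) (x : Int) (s : Multiset Int) (n : Int) :
    FF b (x ::ₘ s) n =
      FF (b + 4 • {x}) s (n - 4) + FF (b + 3 • {x}) s (n - 3) + FF (b + 2 • {x}) s (n - 2) +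
      FF (b + {x}) s (n - 1) + FF b s n := by
  rw [FF]
  simp only [core_cons]
  simp only [List.sum_map_add]
  rw [piece4 b x s n, piece3 b x s n, piece2 b x s n, piece1 b x s n]
  rfl

-- ---- B side ----
lemma goB_FF : ∀ (a : List Int) (n : Int) (b : Multiset Int),
    (↑((goB a n).map (fun h => b + mco h)) : Multiset (Multiset Int)) = FF b (mco a) n := by
  intro a
  induction a with
  | nil =>
    intro n b
    show (↑((if n = 0 then [[]] else ([] : List (List Int))).map (fun h => b + mco h)) :
        Multiset (Multiset Int)) = FF b (mco ([] : List Int)) n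
    rw [show mco ([] : List Int) = 0 from rfl, FF_nil]
    by_cases h : n = 0
    · subst h; simp [mco]
    · rw [if_neg h, if_neg h]; rfl
  | cons x rest ih =>
    intro n b
    have hIf : ∀ (c : Prop) [Decidable c] (acc q : List (List Int)),
        (if c then acc ++ q else acc) = acc ++ (if c then q else []) := by
      intro c _ acc q; split <;> simp
    have hg : goB (x :: rest) n =
        ((((([] ++
          (if (0:Int) ≤ n then (goB rest (n - 0)).map
            (fun h => List.replicate (0:Int).toNat x ++ h) else [])) ++
          (if (1:Int) ≤ n then (goB rest (n - 1)).map
            (fun h => List.replicate (1:Int).toNat x ++ h) else [])) ++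
          (if (2:Int) ≤ n then (goB rest (n - 2)).map
            (fun h => List.replicate (2:Int).toNat x ++ h) else [])) ++
          (if (3:Int) ≤ n then (goB rest (n - 3)).map
            (fun h => List.replicate (3:Int).toNat x ++ h) else [])) ++
          (if (4:Int) ≤ n then (goB rest (n - 4)).map
            (fun h => List.replicate (4:Int).toNat x ++ h) else [])) := by
      show (PySem.List.pyRange 0 5 1).foldl _ [] = _
      rw [show PySem.List.pyRange 0 5 1 = [0, 1, 2, 3, 4] from by decide]
      simp only [List.foldl_cons, List.foldl_nil, hIf]
    rw [hg]
    have hite : ∀ (c : Prop) [Decidable c] (Q : List (List Int)),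
        (↑((if c then Q else []).map (fun h => b + mco h)) : Multiset (Multiset Int)) =
          if c then (↑(Q.map (fun h => b + mco h)) : Multiset (Multiset Int)) else 0 := by
      intro c _ Q; split <;> rfl
    simp only [List.nil_append, List.map_append, ← Multiset.coe_add, hite]
    have hterm : ∀ (m : Nat) (nm : Int),
        (↑(((goB rest nm).map (fun h => List.replicate m x ++ h)).map (fun h => b + mco h)) :
          Multiset (Multiset Int)) = FF (b + m • {x}) (mco rest) nm := by
      intro m nm
      rw [List.map_map]
      have hc : ((fun h => b + mco h) ∘ (fun h => List.replicate m x ++ h)) =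
          (fun h => (b + m • {x}) + mco h) := by
        funext h
        show b + mco (List.replicate m x ++ h) = _
        rw [mco_append, show mco (List.replicate m x) = m • ({x} : Multiset Int) from by
          show ((List.replicate m x : List Int) : Multiset Int) = _
          rw [Multiset.coe_replicate, Multiset.nsmul_singleton], ← add_assoc]
      rw [hc]
      exact ih nm (b + m • {x})
    rw [hterm, hterm, hterm, hterm, hterm]
    have hdrop : ∀ (m' : Int) (B : Multiset Int),
        (if m' ≤ n then FF B (mco rest) (n - m') else 0) = FF B (mco rest) (n - m') := by
      intro m' B
      split
      · rfl
      · rw [FF_neg _ _ (by omega)]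
    rw [hdrop, hdrop, hdrop, hdrop, hdrop]
    rw [show mco (x :: rest) = x ::ₘ mco rest from rfl, FF_cons]
    rw [show ((0:Int)).toNat = 0 from rfl, show ((1:Int)).toNat = 1 from rfl,
      show ((2:Int)).toNat = 2 from rfl, show ((3:Int)).toNat = 3 from rfl,
      show ((4:Int)).toNat = 4 from rfl]
    rw [show n - 0 = n from by ring]
    simp only [zero_smul, add_zero, one_smul]
    abel

lemma B_coe (a : List Int) (n : Int) :
    (↑((goB a n).map (fun h => PySem.List.sorted h (fun x => x) false)) : Multiset (List Int)) =
      (FF 0 (mco a) n).map Hm := by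
  have h2 : (goB a n).map (fun h => PySem.List.sorted h (fun x => x) false) =
      (goB a n).map (fun h => Hm (0 + mco h)) :=
    List.map_congr_left (fun h _ => by rw [zero_add]; exact sortL_eq h)
  rw [h2, show ((goB a n).map (fun h => Hm (0 + mco h)))
      = ((goB a n).map (fun h => 0 + mco h)).map Hm from by rw [List.map_map]; rfl]
  rw [← Multiset.map_coe, goB_FF]

-- ===== VERDICT (by name: the statement is the Claim_ definition above) =====
theorem allptn_spec : Claim_equal_allptn := by
  intro a n _
  unfold Spec_allptn allptn allptn_alt
  rw [inst_fix, inst_fix]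
  refine (PySem.List.sorted_id_eq_sorted_id_iff_perm _ _).mpr (Multiset.coe_eq_coe.mp ?_)
  rw [A_coe a n, B_coe a n]
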